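-- pv_equiv track=rewrite | github.com/fabric-testbed/loomai | backend/app/chat_context.py | filter_tool_schemas
-- ===== SOURCE A (Python) =====
-- CORE_TOOLS = {
--     # Slice lifecycle
--     "list_slices", "get_slice", "create_slice", "submit_slice", "delete_slice",
--     "renew_slice", "validate_slice", "refresh_slice",
--     # Slice mutation (topology editing)
--     "add_node", "add_component", "add_network", "add_fabnet",
--     "update_node", "remove_node", "remove_network",
--     # Resource discovery for placement
--     "query_sites", "get_site_hosts",
--     # Weaves / templates
--     "create_weave", "list_templates", "load_template", "save_as_template",
--     # Background run lifecycle
--     "start_background_run", "stop_background_run",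
--     "list_background_runs", "get_background_run_output",
--     # Files + VM ops
--     "write_file", "read_file", "ssh_execute", "write_vm_file", "read_vm_file",
--     "reboot_and_wait",
--     # Examples / search
--     "search_examples",
--     # Chameleon core
--     "list_chameleon_leases", "list_chameleon_sites", "create_chameleon_lease",
-- }
--
-- def filter_tool_schemas(schemas: list[dict], max_tools: int) -> list[dict]:
--     """Return top N tools, prioritizing CORE_TOOLS."""
--     if len(schemas) <= max_tools:
--         return schemas
--
--     # Split into core and non-core
--     core = [s for s in schemas if s.get("function", {}).get("name") in CORE_TOOLS]
--     non_core = [s for s in schemas if s.get("function", {}).get("name") not in CORE_TOOLS]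
--
--     # Fill up to max_tools
--     remaining = max_tools - len(core)
--     if remaining > 0:
--         return core + non_core[:remaining]
--     return core[:max_tools]
-- ===== SOURCE B (Python) =====
-- CORE_TOOLS = {
--     # Slice lifecycle
--     "list_slices", "get_slice", "create_slice", "submit_slice", "delete_slice",
--     "renew_slice", "validate_slice", "refresh_slice",
--     # Slice mutation (topology editing)
--     "add_node", "add_component", "add_network", "add_fabnet",
--     "update_node", "remove_node", "remove_network",
--     # Resource discovery for placement
--     "query_sites", "get_site_hosts",
--     # Weaves / templates
--     "create_weave", "list_templates", "load_template", "save_as_template",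
--     # Background run lifecycle
--     "start_background_run", "stop_background_run",
--     "list_background_runs", "get_background_run_output",
--     # Files + VM ops
--     "write_file", "read_file", "ssh_execute", "write_vm_file", "read_vm_file",
--     "reboot_and_wait",
--     # Examples / search
--     "search_examples",
--     # Chameleon core
--     "list_chameleon_leases", "list_chameleon_sites", "create_chameleon_lease",
-- }
--
--
-- def _deferred(schema):
--     """True for schemas that are NOT core tools (they rank after core ones)."""
--     return schema.get("function", {}).get("name", "") not in CORE_TOOLS
--
--
-- def filter_tool_schemas(schemas: list[dict], max_tools: int) -> list[dict]:
--     """Return top N tools, prioritizing CORE_TOOLS."""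
--     if max_tools < len(schemas):
--         # Rank the INDICES with one stable sort on a boolean key (core first,
--         # original order kept inside each group), truncate, then gather.
--         order = sorted(range(len(schemas)), key=lambda i: _deferred(schemas[i]))
--         return [schemas[i] for i in order[:max_tools]]
--     return schemas
-- ===== Notes on version B (the rewrite author's own statement) =====
-- stated objective: alternative
-- what changed: Replaces A's two element-filtering passes plus remaining/overflow branch arithmetic by ranking the index range with one stable boolean-key sort, truncating the index list, and gathering the schemas by index.
-- outside the precondition, e.g. on filter_tool_schemas([{}, {'': {}}], -1): A returns [], B returns [{}]
import Mathlib
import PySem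

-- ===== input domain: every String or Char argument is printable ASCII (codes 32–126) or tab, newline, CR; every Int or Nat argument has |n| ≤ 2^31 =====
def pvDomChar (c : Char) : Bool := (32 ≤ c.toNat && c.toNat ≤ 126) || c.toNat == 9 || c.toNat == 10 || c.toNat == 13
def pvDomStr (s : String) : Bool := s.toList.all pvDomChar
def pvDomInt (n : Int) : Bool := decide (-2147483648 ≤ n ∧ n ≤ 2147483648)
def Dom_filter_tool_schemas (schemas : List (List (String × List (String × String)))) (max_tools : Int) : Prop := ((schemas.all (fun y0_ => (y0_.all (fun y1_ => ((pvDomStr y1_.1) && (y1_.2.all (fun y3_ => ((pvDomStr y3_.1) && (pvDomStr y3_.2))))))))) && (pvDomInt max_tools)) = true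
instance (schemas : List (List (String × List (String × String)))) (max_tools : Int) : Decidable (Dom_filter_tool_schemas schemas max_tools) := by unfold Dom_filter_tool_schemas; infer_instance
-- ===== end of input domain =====

-- B ranks the index range with one stable boolean-key sort, truncates, and gathers by index, instead of A's two filtering passes plus branch arithmetic (alternative decomposition, not faster).


-- Module-level constant CORE_TOOLS (a set of string literals, shared by A and B).
def CORE_TOOLS : List String :=
  ["list_slices", "get_slice", "create_slice", "submit_slice", "delete_slice",
   "renew_slice", "validate_slice", "refresh_slice",
   "add_node", "add_component", "add_network", "add_fabnet",
   "update_node", "remove_node", "remove_network",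
   "query_sites", "get_site_hosts",
   "create_weave", "list_templates", "load_template", "save_as_template",
   "start_background_run", "stop_background_run",
   "list_background_runs", "get_background_run_output",
   "write_file", "read_file", "ssh_execute", "write_vm_file", "read_vm_file",
   "reboot_and_wait",
   "search_examples",
   "list_chameleon_leases", "list_chameleon_sites", "create_chameleon_lease"]

-- ===== PORT A =====
-- s.get("function", {}).get("name") in CORE_TOOLS  (None is never in a set of strings)
def pvIsCore (s : List (String × List (String × String))) : Bool :=
  match PySem.Dict.get? (PySem.Dict.mk (PySem.Dict.getD (PySem.Dict.mk s) "function" [])) "name" with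
  | some n => CORE_TOOLS.contains n
  | none => false

def filter_tool_schemas (schemas : List (List (String × List (String × String)))) (max_tools : Int) : List (List (String × List (String × String))) :=
  if (schemas.length : Int) ≤ max_tools then schemas
  else
    let core := schemas.filter (fun s => pvIsCore s)
    let non_core := schemas.filter (fun s => !pvIsCore s)
    let remaining := max_tools - (core.length : Int)
    if remaining > 0 then core ++ PySem.List.slice non_core none (some remaining)
    else PySem.List.slice core none (some max_tools)

-- ===== PORT B =====
-- _deferred: schema.get("function", {}).get("name", "") not in CORE_TOOLS
-- ("" is not in CORE_TOOLS, so the "" default behaves exactly like Python's None default)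
def pvDeferred (schema : List (String × List (String × String))) : Bool :=
  !(CORE_TOOLS.contains (PySem.Dict.getD (PySem.Dict.mk (PySem.Dict.getD (PySem.Dict.mk schema) "function" [])) "name" ""))

def filter_tool_schemas_alt (schemas : List (List (String × List (String × String)))) (max_tools : Int) : List (List (String × List (String × String))) :=
  if max_tools < (schemas.length : Int) then
    -- order[:max_tools] gathered: [schemas[i] for i in order[:max_tools]], where
    -- order = sorted(range(len(schemas)), key=lambda i: _deferred(schemas[i]))
    -- (indices drawn from range(len(schemas)) are in range, so schemas[i] is total)
    (PySem.List.slice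
       (PySem.List.sorted (PySem.List.pyRange 0 (schemas.length : Int) 1)
          (fun i => pvDeferred (PySem.List.pyGetD schemas i [])))
       none (some max_tools)).map (fun i => PySem.List.pyGetD schemas i [])
  else schemas

-- ===== PRECONDITION & SPEC =====
-- Pre_ excludes negative max_tools (on which A still returns): there the limit is degenerate and
-- A's value — a Python negative-end slice applied to the core sublist only — is an accident of its
-- implementation, as defensible as B's negative-end truncation of the ranked index list; neither is specified.
def Pre_filter_tool_schemas (schemas : List (List (String × List (String × String)))) (max_tools : Int) : Prop := 0 ≤ max_tools
instance (schemas : List (List (String × List (String × String)))) (max_tools : Int) : Decidable (Pre_filter_tool_schemas schemas max_tools) := by unfold Pre_filter_tool_schemas; infer_instance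

def pvWitness_filter_tool_schemas : (List (List (String × List (String × String)))) × Int :=
  ([[("function", [("name", "get_slice")])], [("function", [("name", "zzz")])]], 1)

def Spec_filter_tool_schemas (schemas : List (List (String × List (String × String)))) (max_tools : Int) (out : List (List (String × List (String × String)))) : Prop := out = filter_tool_schemas_alt schemas max_tools
instance (schemas : List (List (String × List (String × String)))) (max_tools : Int) (out : List (List (String × List (String × String)))) : Decidable (Spec_filter_tool_schemas schemas max_tools out) := by unfold Spec_filter_tool_schemas; infer_instance

-- ===== CLAIM (what is proved, stated in full; the proofs are below) =====
def Claim_equal_filter_tool_schemas : Prop := ∀ (schemas : List (List (String × List (String × String)))) (max_tools : Int), Dom_filter_tool_schemas schemas max_tools → Pre_filter_tool_schemas schemas max_tools → Spec_filter_tool_schemas schemas max_tools (filter_tool_schemas schemas max_tools)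

-- ===== LEMMAS AND PROOFS =====

-- B's key agrees with the negation of A's core test ("" is not in CORE_TOOLS).
theorem pvDeferred_eq_not_isCore (s : List (String × List (String × String))) :
    pvDeferred s = !pvIsCore s := by
  unfold pvDeferred pvIsCore PySem.Dict.getD
  cases PySem.Dict.get? (PySem.Dict.mk (((PySem.Dict.get? (PySem.Dict.mk s) "function").getD [])) ) "name" with
  | none => rfl
  | some n => rfl

-- Inserting an element whose key is false into (all-false ++ all-true) puts it between the groups.
theorem insertBy_false_split {α : Type} (key : α → Bool) (x : α) (hx : key x = false)
    (l0 l1 : List α) (h0 : ∀ y ∈ l0, key y = false) (h1 : ∀ y ∈ l1, key y = true) :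
    PySem.List.insertBy (fun a b => decide (key a < key b)) x (l0 ++ l1) = l0 ++ x :: l1 := by
  induction l0 with
  | nil =>
    cases l1 with
    | nil => simp [PySem.List.insertBy]
    | cons y ys =>
      have : key y = true := h1 y (by simp)
      simp [PySem.List.insertBy, hx, this]
  | cons a l0 ih =>
    have ha : key a = false := h0 a (by simp)
    have ih' := ih (fun y hy => h0 y (by simp [hy]))
    simp [List.cons_append, PySem.List.insertBy, hx, ha, ih']

-- Inserting an element whose key is true appends it at the end.
theorem insertBy_true_append {α : Type} (key : α → Bool) (x : α) (hx : key x = true)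
    (l : List α) :
    PySem.List.insertBy (fun a b => decide (key a < key b)) x l = l ++ [x] := by
  apply PySem.List.insertBy_of_forall_not_before
  intro y _
  simp [hx, Bool.lt_iff]

-- The stable insertion sort with a boolean key is the false-group followed by the true-group.
theorem sorted_bool_key_eq_filter {α : Type} (key : α → Bool) (xs : List α) :
    PySem.List.sorted xs key = xs.filter (fun s => key s = false) ++ xs.filter (fun s => key s = true) := by
  rw [PySem.List.sorted_eq_foldl_insertBy]
  suffices h : ∀ (l0 l1 : List α), (∀ y ∈ l0, key y = false) → (∀ y ∈ l1, key y = true) →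
      xs.foldl (fun acc x => PySem.List.insertBy (fun a b => decide (key a < key b)) x acc) (l0 ++ l1)
      = (l0 ++ xs.filter (fun s => key s = false)) ++ (l1 ++ xs.filter (fun s => key s = true)) by
    simpa using h [] [] (by simp) (by simp)
  induction xs with
  | nil => simp
  | cons x xs ih =>
    intro l0 l1 h0 h1
    simp only [List.foldl_cons]
    cases hx : key x with
    | false =>
      rw [insertBy_false_split key x hx l0 l1 h0 h1,
          show l0 ++ x :: l1 = (l0 ++ [x]) ++ l1 by simp]
      rw [ih (l0 ++ [x]) l1 (by intro y hy; rcases List.mem_append.mp hy with h | h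
                                · exact h0 y h
                                · simp at h; simpa [h] using hx) h1]
      simp [hx]
    | true =>
      rw [insertBy_true_append key x hx (l0 ++ l1), List.append_assoc,
          ih l0 (l1 ++ [x]) h0 (by intro y hy; rcases List.mem_append.mp hy with h | h
                                   · exact h1 y h
                                   · simp at h; simpa [h] using hx)]
      simp [hx]

-- Gathering a filtered index range by index is a filter of the list itself.
theorem gather_filter {α : Type} (xs : List α) (d : α) (p : α → Bool) :
    ((PySem.List.pyRange 0 (xs.length : Int) 1).filter (fun i => p (PySem.List.pyGetD xs i d))).map
      (fun i => PySem.List.pyGetD xs i d) = xs.filter p := by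
  have h := List.filter_map (f := fun i => PySem.List.pyGetD xs i d)
    (l := PySem.List.pyRange 0 (xs.length : Int) 1) (p := p)
  simp only [Function.comp_def] at h
  rw [← h, PySem.List.map_pyGetD_pyRange_zero' xs d]

-- ===== VERDICT (by name: the statement is the Claim_ definition above) =====
theorem filter_tool_schemas_spec : Claim_equal_filter_tool_schemas := by
  intro schemas max_tools _ hpre
  unfold Spec_filter_tool_schemas filter_tool_schemas filter_tool_schemas_alt
  by_cases hle : (schemas.length : Int) ≤ max_tools
  · rw [if_pos hle, if_neg (show ¬ max_tools < (schemas.length : Int) by omega)]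
  · rw [if_neg hle, if_pos (show max_tools < (schemas.length : Int) by omega),
        sorted_bool_key_eq_filter, PySem.List.slice_to _ hpre, List.map_take, List.map_append,
        gather_filter schemas [] (fun s => decide (pvDeferred s = false)),
        gather_filter schemas [] (fun s => decide (pvDeferred s = true))]
    have hf : schemas.filter (fun s => decide (pvDeferred s = false))
        = schemas.filter (fun s => pvIsCore s) := by
      apply List.filter_congr; intro a _; simp [pvDeferred_eq_not_isCore]
    have ht : schemas.filter (fun s => decide (pvDeferred s = true))
        = schemas.filter (fun s => !pvIsCore s) := by
      apply List.filter_congr; intro a _; simp [pvDeferred_eq_not_isCore]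
    rw [hf, ht]
    set core := schemas.filter (fun s => pvIsCore s) with hcore
    set non_core := schemas.filter (fun s => !pvIsCore s) with hnc
    by_cases hrem : max_tools - (core.length : Int) > 0
    · rw [if_pos hrem, PySem.List.slice_to _ (by omega)]
      have hmt : max_tools.toNat = core.length + (max_tools - (core.length : Int)).toNat := by omega
      rw [hmt, List.take_append]
      simp
    · rw [if_neg hrem, PySem.List.slice_to _ hpre]
      exact (List.take_append_of_le_length (by omega)).symm
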